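-- pv_equiv track=rewrite | github.com/Team-A-I/otoo_python | module_friendship.py | narration_emotion_changes
-- ===== SOURCE A (Python) =====
-- def narration_emotion_changes(score_list):
--     result = []
--
--     for person, scores in score_list.items():
--         rise_detected = False
--         fall_detected = False
--
--         for i in range(0, len(scores)-4, 5):
--             first_score = scores[i]
--             last_score = scores[i + 4]
--
--             change = last_score - first_score
--
--             if change >= 5 and not rise_detected:
--                 result.append(f"아~ 지금 '{person}'의 우정 수치가 상승하고 있어요!")
--                 rise_detected = True
--             elif change <= -5 and not fall_detected:
--                 result.append(f"아~ 지금 '{person}'의 우정 수치가 떨어지고 있어요!")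
--                 fall_detected = True
--
--         if not rise_detected and not fall_detected:
--             result.append("아~주 무난한 친구들 간의 대화네요")
--
--     return result
-- ===== SOURCE B (Python) =====
-- def _first_index(xs, pred):
--     for j, x in enumerate(xs):
--         if pred(x):
--             return j
--     return None
--
--
-- def narration_emotion_changes(score_list):
--     result = []
--     for person, scores in score_list.items():
--         changes = [scores[i + 4] - scores[i] for i in range(0, len(scores) - 4, 5)]
--         rise = _first_index(changes, lambda c: c >= 5)
--         fall = _first_index(changes, lambda c: c <= -5)
--         if rise is None and fall is None:
--             result.append("아~주 무난한 친구들 간의 대화네요")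
--         elif fall is None:
--             result.append(f"아~ 지금 '{person}'의 우정 수치가 상승하고 있어요!")
--         elif rise is None:
--             result.append(f"아~ 지금 '{person}'의 우정 수치가 떨어지고 있어요!")
--         elif rise < fall:
--             result.append(f"아~ 지금 '{person}'의 우정 수치가 상승하고 있어요!")
--             result.append(f"아~ 지금 '{person}'의 우정 수치가 떨어지고 있어요!")
--         else:
--             result.append(f"아~ 지금 '{person}'의 우정 수치가 떨어지고 있어요!")
--             result.append(f"아~ 지금 '{person}'의 우정 수치가 상승하고 있어요!")
--     return result
-- ===== Notes on version B (the rewrite author's own statement) =====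
-- stated objective: alternative
-- what changed: A threads rise/fall boolean flags through a single stateful pass that appends messages as it scans; B first builds the per-person table of non-overlapping window changes, then searches it for the first rise index and the first fall index and emits the messages by comparing those indices (build-table-then-search decomposition).
import Mathlib
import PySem

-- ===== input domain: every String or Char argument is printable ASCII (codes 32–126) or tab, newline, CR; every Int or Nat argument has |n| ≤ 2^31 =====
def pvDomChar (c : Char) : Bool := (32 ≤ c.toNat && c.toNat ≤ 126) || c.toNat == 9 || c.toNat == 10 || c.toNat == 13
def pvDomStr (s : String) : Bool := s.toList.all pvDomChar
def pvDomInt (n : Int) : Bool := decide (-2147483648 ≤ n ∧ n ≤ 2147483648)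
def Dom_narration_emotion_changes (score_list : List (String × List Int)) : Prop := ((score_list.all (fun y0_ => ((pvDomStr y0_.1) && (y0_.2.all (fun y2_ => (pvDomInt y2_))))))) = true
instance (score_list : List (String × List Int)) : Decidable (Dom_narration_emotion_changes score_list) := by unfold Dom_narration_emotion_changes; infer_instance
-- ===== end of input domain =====

-- B replaces A's flag-threading single pass by a build-the-change-table-then-search-it decomposition (alternative; return values proved equal).

-- message literals (shared f-string texts of both Pythons)
def riseMsg (person : String) : String := "아~ 지금 '" ++ person ++ "'의 우정 수치가 상승하고 있어요!"
def fallMsg (person : String) : String := "아~ 지금 '" ++ person ++ "'의 우정 수치가 떨어지고 있어요!"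
def neutralMsg : String := "아~주 무난한 친구들 간의 대화네요"

-- ===== PORT A =====
-- body of A's inner `for i in range(...)` loop: state = (result, rise_detected, fall_detected)
def aStep (person : String) (scores : List Int) (st : List String × Bool × Bool) (i : Int) :
    List String × Bool × Bool :=
  let first_score := PySem.List.pyGetD scores i 0
  let last_score := PySem.List.pyGetD scores (i + 4) 0
  let change := last_score - first_score
  if change ≥ 5 ∧ st.2.1 = false then (st.1 ++ [riseMsg person], true, st.2.2)
  else if change ≤ -5 ∧ st.2.2 = false then (st.1 ++ [fallMsg person], st.2.1, true)
  else st

def narration_emotion_changes (score_list : List (String × List Int)) : List String :=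
  score_list.foldl (fun result ps =>
    let st := (PySem.List.pyRange 0 ((ps.2.length : Int) - 4) 5).foldl (aStep ps.1 ps.2)
      (result, false, false)
    if st.2.1 = false ∧ st.2.2 = false then st.1 ++ [neutralMsg] else st.1) []

-- ===== PORT B =====
-- port of Source B's _first_index (next over enumerate)
def firstIndex : List Int → (Int → Bool) → Option Nat
  | [], _ => none
  | x :: rest, pred => if pred x then some 0 else (firstIndex rest pred).map (· + 1)

-- Source B's if/elif chain deciding what to emit for one person from its change table
def personMsgs (person : String) (changes : List Int) : List String :=
  match firstIndex changes (fun c => c ≥ 5), firstIndex changes (fun c => c ≤ -5) with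
  | none, none => [neutralMsg]
  | some _, none => [riseMsg person]
  | none, some _ => [fallMsg person]
  | some rise, some fall =>
    if rise < fall then [riseMsg person, fallMsg person]
    else [fallMsg person, riseMsg person]

def narration_emotion_changes_alt (score_list : List (String × List Int)) : List String :=
  score_list.foldl (fun result ps =>
    let changes := (PySem.List.pyRange 0 ((ps.2.length : Int) - 4) 5).map
      (fun i => PySem.List.pyGetD ps.2 (i + 4) 0 - PySem.List.pyGetD ps.2 i 0)
    result ++ personMsgs ps.1 changes) []

-- ===== PRECONDITION & SPEC =====
def Spec_narration_emotion_changes (score_list : List (String × List Int)) (out : List String) : Prop := out = narration_emotion_changes_alt score_list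
instance (score_list : List (String × List Int)) (out : List String) : Decidable (Spec_narration_emotion_changes score_list out) := by unfold Spec_narration_emotion_changes; infer_instance

-- ===== CLAIM (what is proved, stated in full; the proofs are below) =====
def Claim_equal_narration_emotion_changes : Prop := ∀ (score_list : List (String × List Int)), Dom_narration_emotion_changes score_list → Spec_narration_emotion_changes score_list (narration_emotion_changes score_list)

-- ===== LEMMAS AND PROOFS =====

-- A's inner step, seen as a function of the change value alone
def cStep (person : String) (st : List String × Bool × Bool) (c : Int) :
    List String × Bool × Bool :=
  if c ≥ 5 ∧ st.2.1 = false then (st.1 ++ [riseMsg person], true, st.2.2)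
  else if c ≤ -5 ∧ st.2.2 = false then (st.1 ++ [fallMsg person], st.2.1, true)
  else st

lemma cStep_ff_rise (p : String) (out : List String) (c : Int) (h5 : c ≥ 5) :
    cStep p (out, false, false) c = (out ++ [riseMsg p], true, false) := by
  simp [cStep, h5]

lemma cStep_ff_fall (p : String) (out : List String) (c : Int) (h5 : ¬ c ≥ 5) (hf : c ≤ -5) :
    cStep p (out, false, false) c = (out ++ [fallMsg p], false, true) := by
  simp [cStep, h5, hf]

lemma cStep_ff_skip (p : String) (out : List String) (c : Int) (h5 : ¬ c ≥ 5) (hf : ¬ c ≤ -5) :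
    cStep p (out, false, false) c = (out, false, false) := by
  simp [cStep, h5, hf]

lemma cStep_tf_fall (p : String) (out : List String) (c : Int) (hf : c ≤ -5) :
    cStep p (out, true, false) c = (out ++ [fallMsg p], true, true) := by
  simp [cStep, hf, show ¬ c ≥ 5 by omega]

lemma cStep_tf_skip (p : String) (out : List String) (c : Int) (hf : ¬ c ≤ -5) :
    cStep p (out, true, false) c = (out, true, false) := by
  simp [cStep, hf]

lemma cStep_ft_rise (p : String) (out : List String) (c : Int) (h5 : c ≥ 5) :
    cStep p (out, false, true) c = (out ++ [riseMsg p], true, true) := by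
  simp [cStep, h5]

lemma cStep_ft_skip (p : String) (out : List String) (c : Int) (h5 : ¬ c ≥ 5) :
    cStep p (out, false, true) c = (out, false, true) := by
  simp [cStep, h5]

lemma cStep_tt (p : String) (out : List String) (c : Int) :
    cStep p (out, true, true) c = (out, true, true) := by
  simp [cStep]

lemma foldl_cStep_tt (p : String) (cs : List Int) (out : List String) :
    cs.foldl (cStep p) (out, true, true) = (out, true, true) := by
  induction cs with
  | nil => rfl
  | cons c rest ih => rw [List.foldl_cons, cStep_tt, ih]

lemma foldl_cStep_tf (p : String) (cs : List Int) (out : List String) :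
    cs.foldl (cStep p) (out, true, false) =
      match firstIndex cs (fun c => c ≤ -5) with
      | none => (out, true, false)
      | some _ => (out ++ [fallMsg p], true, true) := by
  induction cs generalizing out with
  | nil => rfl
  | cons c rest ih =>
    by_cases hf : c ≤ -5
    · rw [List.foldl_cons, cStep_tf_fall p out c hf, foldl_cStep_tt]
      simp [firstIndex, hf]
    · rw [List.foldl_cons, cStep_tf_skip p out c hf, ih]
      simp only [firstIndex, hf, decide_false, Bool.false_eq_true, if_false]
      cases firstIndex rest (fun c => c ≤ -5) <;> simp

lemma foldl_cStep_ft (p : String) (cs : List Int) (out : List String) :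
    cs.foldl (cStep p) (out, false, true) =
      match firstIndex cs (fun c => c ≥ 5) with
      | none => (out, false, true)
      | some _ => (out ++ [riseMsg p], true, true) := by
  induction cs generalizing out with
  | nil => rfl
  | cons c rest ih =>
    by_cases h5 : c ≥ 5
    · rw [List.foldl_cons, cStep_ft_rise p out c h5, foldl_cStep_tt]
      simp [firstIndex, h5]
    · rw [List.foldl_cons, cStep_ft_skip p out c h5, ih]
      simp only [firstIndex, h5, decide_false, Bool.false_eq_true, if_false]
      cases firstIndex rest (fun c => c ≥ 5) <;> simp

-- the per-person core: A's flagged fold + neutral wrap-up equals B's table search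
lemma person_core (p : String) (cs : List Int) (out : List String) :
    (if (cs.foldl (cStep p) (out, false, false)).2.1 = false ∧
        (cs.foldl (cStep p) (out, false, false)).2.2 = false
     then (cs.foldl (cStep p) (out, false, false)).1 ++ [neutralMsg]
     else (cs.foldl (cStep p) (out, false, false)).1) = out ++ personMsgs p cs := by
  induction cs generalizing out with
  | nil => simp [personMsgs, firstIndex]
  | cons c rest ih =>
    by_cases h5 : c ≥ 5
    · have hf : ¬ c ≤ -5 := by omega
      rw [List.foldl_cons, cStep_ff_rise p out c h5, foldl_cStep_tf]
      cases hfl : firstIndex rest (fun c => c ≤ -5) with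
      | none => simp [personMsgs, firstIndex, h5, hf, hfl]
      | some j => simp [personMsgs, firstIndex, h5, hf, hfl]
    · by_cases hf : c ≤ -5
      · rw [List.foldl_cons, cStep_ff_fall p out c h5 hf, foldl_cStep_ft]
        cases hr : firstIndex rest (fun c => c ≥ 5) with
        | none => simp [personMsgs, firstIndex, h5, hf, hr]
        | some j => simp [personMsgs, firstIndex, h5, hf, hr]
      · rw [List.foldl_cons, cStep_ff_skip p out c h5 hf, ih]
        have hskip : personMsgs p (c :: rest) = personMsgs p rest := by
          simp only [personMsgs, firstIndex, h5, hf, decide_false, Bool.false_eq_true, if_false]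
          cases hr : firstIndex rest (fun c => c ≥ 5) <;>
            cases hfl : firstIndex rest (fun c => c ≤ -5) <;> simp
        rw [hskip]

theorem ports_agree (score_list : List (String × List Int)) :
    narration_emotion_changes score_list = narration_emotion_changes_alt score_list := by
  unfold narration_emotion_changes narration_emotion_changes_alt
  suffices h : ∀ (sl : List (String × List Int)) (out : List String),
      sl.foldl (fun result ps =>
        let st := (PySem.List.pyRange 0 ((ps.2.length : Int) - 4) 5).foldl (aStep ps.1 ps.2)
          (result, false, false)
        if st.2.1 = false ∧ st.2.2 = false then st.1 ++ [neutralMsg] else st.1) out =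
      sl.foldl (fun result ps =>
        let changes := (PySem.List.pyRange 0 ((ps.2.length : Int) - 4) 5).map
          (fun i => PySem.List.pyGetD ps.2 (i + 4) 0 - PySem.List.pyGetD ps.2 i 0)
        result ++ personMsgs ps.1 changes) out by
    exact h score_list []
  intro sl
  induction sl with
  | nil => intro out; rfl
  | cons ps rest ih =>
    intro out
    simp only [List.foldl_cons]
    have hacc :
        (if ((PySem.List.pyRange 0 ((ps.2.length : Int) - 4) 5).foldl (aStep ps.1 ps.2)
              (out, false, false)).2.1 = false ∧
            ((PySem.List.pyRange 0 ((ps.2.length : Int) - 4) 5).foldl (aStep ps.1 ps.2)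
              (out, false, false)).2.2 = false
         then ((PySem.List.pyRange 0 ((ps.2.length : Int) - 4) 5).foldl (aStep ps.1 ps.2)
              (out, false, false)).1 ++ [neutralMsg]
         else ((PySem.List.pyRange 0 ((ps.2.length : Int) - 4) 5).foldl (aStep ps.1 ps.2)
              (out, false, false)).1) =
        out ++ personMsgs ps.1 ((PySem.List.pyRange 0 ((ps.2.length : Int) - 4) 5).map
          (fun i => PySem.List.pyGetD ps.2 (i + 4) 0 - PySem.List.pyGetD ps.2 i 0)) := by
      have h := person_core ps.1 ((PySem.List.pyRange 0 ((ps.2.length : Int) - 4) 5).map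
        (fun i => PySem.List.pyGetD ps.2 (i + 4) 0 - PySem.List.pyGetD ps.2 i 0)) out
      rw [List.foldl_map] at h
      exact h
    rw [hacc]
    exact ih (out ++ personMsgs ps.1 _)

-- ===== VERDICT (by name: the statement is the Claim_ definition above) =====
theorem narration_emotion_changes_spec : Claim_equal_narration_emotion_changes := by
  intro score_list _
  exact ports_agree score_list
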